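-- pv_equiv track=rewrite | github.com/thejolotoproject/blind-rce | helpers/file.py | http_normalize_slashes
-- ===== SOURCE A (Python) =====
-- def http_normalize_slashes(url):
--     url = str(url)
--     segments = url.split('/')
--     correct_segments = []
--     for segment in segments:
--         if segment != '':
--             correct_segments.append(segment)
--     first_segment = str(correct_segments[0])
--     if first_segment.find('http') == -1:
--         correct_segments = ['http:'] + correct_segments
--     correct_segments[0] = correct_segments[0] + '/'
--     normalized_url = '/'.join(correct_segments)
--     return normalized_url.replace(" ", "")
-- ===== SOURCE B (Python) =====
-- def http_normalize_slashes(url):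
--     chars = []
--     for c in str(url):
--         if not (c == '/' and chars and chars[-1] == '/'):
--             chars.append(c)
--     s = ''.join(chars).strip('/')
--     parts = s.split('/', 1)
--     head = parts[0]
--     prefix = head + '/' if 'http' in head else 'http://' + head
--     out = prefix + '/' + parts[1] if len(parts) == 2 else prefix
--     return out.replace(' ', '')
-- ===== Notes on version B (the rewrite author's own statement) =====
-- stated objective: alternative
-- what changed: B replaces A's split-on-'/'/filter/rejoin pipeline with a single character pass that collapses duplicate slashes, a strip of leading/trailing slashes, and one split at the first remaining slash.
-- outside the precondition, e.g. on http_normalize_slashes(''): A raises IndexError, B returns 'http://'; on http_normalize_slashes('/'): A raises IndexError, B returns 'http://'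
import Mathlib
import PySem

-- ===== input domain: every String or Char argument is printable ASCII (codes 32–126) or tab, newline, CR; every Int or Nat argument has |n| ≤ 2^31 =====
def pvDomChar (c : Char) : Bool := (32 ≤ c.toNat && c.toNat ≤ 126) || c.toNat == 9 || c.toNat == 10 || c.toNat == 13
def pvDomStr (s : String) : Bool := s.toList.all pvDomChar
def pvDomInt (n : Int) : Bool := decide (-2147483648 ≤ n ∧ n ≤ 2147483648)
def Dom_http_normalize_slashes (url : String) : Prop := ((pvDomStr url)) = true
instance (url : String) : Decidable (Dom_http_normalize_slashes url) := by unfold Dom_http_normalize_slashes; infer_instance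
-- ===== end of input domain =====

-- B replaces A's split/filter/join pipeline with a single character pass that collapses
-- duplicate slashes, a strip of the ends, and one split at the first remaining slash (objective: alternative).
-- Python '+' on str, exact (ports must not go through Lean's opaque String.append)
def strCat (a b : String) : String := String.ofList (a.toList ++ b.toList)

-- ===== PORT A =====
def http_normalize_slashes (url : String) : String :=
  let segments := (PySem.Str.split? url "/").getD []        -- url.split('/'); sep "/" is non-empty so split? is `some`
  let correct := segments.foldl (fun acc seg => if seg ≠ "" then acc ++ [seg] else acc) ([] : List String)
  match correct with
  | [] => ""                                                -- correct_segments[0] raises IndexError here; excluded by Pre_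
  | first :: rest =>
    let correct2 := if PySem.Str.find first "http" == -1 then "http:" :: first :: rest else first :: rest
    let correct3 := match correct2 with
      | [] => []
      | h :: t => strCat h "/" :: t                         -- correct_segments[0] = correct_segments[0] + '/'
    PySem.Str.replace (PySem.Str.join "/" correct3) " " ""

-- ===== PORT B =====
def http_normalize_slashes_alt (url : String) : String :=
  let chars := url.toList.foldl
    (fun acc c => if c = '/' ∧ acc ≠ [] ∧ acc.getLast? = some '/' then acc else acc ++ [c]) []
  let s := PySem.Str.stripChars (String.ofList chars) "/"
  let parts := (PySem.Str.splitMax? s "/" 1).getD []        -- s.split('/', 1); sep non-empty so `some`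
  let head := parts.headD ""                                -- parts[0]; parts is never empty
  let pre := if PySem.Str.isIn "http" head then strCat head "/" else strCat "http://" head
  let out := match parts with
    | [_, rest] => strCat pre (strCat "/" rest)
    | _ => pre
  PySem.Str.replace out " " ""

-- ===== PRECONDITION & SPEC =====
-- Pre_ excludes exactly the inputs (all characters '/', including "") on which A's
-- correct_segments[0] raises IndexError.
def Pre_http_normalize_slashes (url : String) : Prop := url.toList.any (fun c => c != '/') = true
instance (url : String) : Decidable (Pre_http_normalize_slashes url) := by unfold Pre_http_normalize_slashes; infer_instance
def pvWitness_http_normalize_slashes : String := "a/b"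

def Spec_http_normalize_slashes (url : String) (out : String) : Prop := out = http_normalize_slashes_alt url
instance (url : String) (out : String) : Decidable (Spec_http_normalize_slashes url out) := by unfold Spec_http_normalize_slashes; infer_instance

-- ===== CLAIM (what is proved, stated in full; the proofs are below) =====
def Claim_equal_http_normalize_slashes : Prop := ∀ (url : String), Dom_http_normalize_slashes url → Pre_http_normalize_slashes url → Spec_http_normalize_slashes url (http_normalize_slashes url)

-- ===== LEMMAS AND PROOFS =====

def splitSlash : List Char → List (List Char)
  | [] => [[]]
  | c :: cs => if c = '/' then [] :: splitSlash cs else (splitSlash cs).modifyHead (c :: ·)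

theorem splitSlash_ne_nil (cs : List Char) : splitSlash cs ≠ [] := by
  induction cs with
  | nil => simp [splitSlash]
  | cons c cs ih =>
    simp only [splitSlash]
    split
    · simp
    · cases h : splitSlash cs with
      | nil => exact absurd h ih
      | cons a t => simp [List.modifyHead]

theorem no_slash_mem_splitSlash (cs : List Char) : ∀ l ∈ splitSlash cs, '/' ∉ l := by
  induction cs with
  | nil => intro l hl; simp [splitSlash] at hl; simp [hl]
  | cons c cs ih =>
    intro l hl
    simp only [splitSlash] at hl
    by_cases hc : c = '/'
    · rw [if_pos hc] at hl
      rcases List.mem_cons.mp hl with h | h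
      · simp [h]
      · exact ih l h
    · rw [if_neg hc] at hl
      rcases heq : splitSlash cs with _ | ⟨a, t⟩
      · exact absurd heq (splitSlash_ne_nil cs)
      · rw [heq] at hl
        simp only [List.modifyHead] at hl
        rcases List.mem_cons.mp hl with h | h
        · subst h
          have ha := ih a (by rw [heq]; exact List.mem_cons_self)
          intro hmem
          rcases List.mem_cons.mp hmem with h' | h'
          · exact hc h'.symm
          · exact ha h'
        · exact ih l (by rw [heq]; exact List.mem_cons_of_mem _ h)

theorem modifyHead_comp (f g : List Char → List Char) (L : List (List Char)) :
    (L.modifyHead g).modifyHead f = L.modifyHead (fun x => f (g x)) := by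
  cases L <;> simp [List.modifyHead]

theorem splitOn_go_eq (l : List Char) : ∀ (fuel : Nat) (cur : List Char) (acc : List (List Char)),
    l.length ≤ fuel →
    PySem.Chars.splitOn.go ['/'] fuel l cur acc
      = acc.reverse ++ (splitSlash l).modifyHead (cur.reverse ++ ·) := by
  induction l with
  | nil =>
    intro fuel cur acc _
    cases fuel <;> simp [PySem.Chars.splitOn.go, splitSlash, List.modifyHead]
  | cons c rest ih =>
    intro fuel cur acc hlen
    cases fuel with
    | zero => simp at hlen
    | succ fuel =>
      rw [PySem.Chars.splitOn.go]
      by_cases hc : c = '/'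
      · have hpre : List.isPrefixOf ['/'] (c :: rest) = true := by simp [List.isPrefixOf, hc]
        rw [if_pos hpre]
        have : List.drop (List.length ['/']) (c :: rest) = rest := by simp
        rw [this, ih fuel [] (cur.reverse :: acc) (by simpa using Nat.le_of_succ_le_succ hlen)]
        simp [splitSlash, hc, List.modifyHead]
        cases h : splitSlash rest <;> simp
      · have hpre : List.isPrefixOf ['/'] (c :: rest) = false := by
          simp [List.isPrefixOf]; exact fun h => hc h.symm
        rw [if_neg (by simp [hpre])]
        rw [ih fuel (c :: cur) acc (by simpa using Nat.le_of_succ_le_succ hlen)]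
        simp [splitSlash, hc]
        cases h : splitSlash rest <;> simp [List.modifyHead]

theorem splitOn_eq_splitSlash (cs : List Char) : PySem.Chars.splitOn cs ['/'] = splitSlash cs := by
  rw [PySem.Chars.splitOn, splitOn_go_eq cs (cs.length + 1) [] [] (by omega)]
  cases h : splitSlash cs <;> simp [List.modifyHead]

theorem splitOnMax_go_zero (l : List Char) (fuel : Nat) (acc : List (List Char)) :
    PySem.Chars.splitOnMax.go ['/'] fuel 0 l [] acc = acc.reverse ++ [l] := by
  cases fuel <;> cases l <;> simp [PySem.Chars.splitOnMax.go]

theorem splitOnMax_go_no_slash (h : List Char) : ∀ (fuel : Nat) (cur : List Char) (acc : List (List Char)),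
    '/' ∉ h → h.length ≤ fuel →
    PySem.Chars.splitOnMax.go ['/'] fuel 1 h cur acc = acc.reverse ++ [cur.reverse ++ h] := by
  induction h with
  | nil => intro fuel cur acc _ _; cases fuel <;> simp [PySem.Chars.splitOnMax.go]
  | cons c rest ih =>
    intro fuel cur acc hns hlen
    cases fuel with
    | zero => simp at hlen
    | succ fuel =>
      rw [PySem.Chars.splitOnMax.go]
      have hc : c ≠ '/' := by intro h; exact hns (by simp [h])
      have hpre : List.isPrefixOf ['/'] (c :: rest) = false := by
        simp [List.isPrefixOf]; exact fun h => hc h.symm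
      rw [if_neg (by omega), if_neg (by simp [hpre])]
      rw [ih fuel (c :: cur) acc (fun hm => hns (List.mem_cons_of_mem _ hm)) (by simpa using Nat.le_of_succ_le_succ hlen)]
      simp

theorem splitOnMax_go_first (h t : List Char) : ∀ (fuel : Nat) (cur : List Char) (acc : List (List Char)),
    '/' ∉ h → (h ++ '/' :: t).length ≤ fuel →
    PySem.Chars.splitOnMax.go ['/'] fuel 1 (h ++ '/' :: t) cur acc
      = acc.reverse ++ [cur.reverse ++ h, t] := by
  induction h with
  | nil =>
    intro fuel cur acc _ hlen
    cases fuel with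
    | zero => simp at hlen
    | succ fuel =>
      simp only [List.nil_append]
      rw [PySem.Chars.splitOnMax.go]
      have hpre : List.isPrefixOf ['/'] ('/' :: t) = true := by simp [List.isPrefixOf]
      rw [if_neg (by omega), if_pos (by simp [hpre])]
      simp only [List.length_cons]
      rw [show (1 : Nat) - 1 = 0 from rfl]
      rw [splitOnMax_go_zero]
      simp
  | cons c rest ih =>
    intro fuel cur acc hns hlen
    cases fuel with
    | zero => simp at hlen
    | succ fuel =>
      simp only [List.cons_append]
      rw [PySem.Chars.splitOnMax.go]
      have hc : c ≠ '/' := by intro h; exact hns (by simp [h])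
      have hpre : List.isPrefixOf ['/'] (c :: (rest ++ '/' :: t)) = false := by
        simp [List.isPrefixOf]; exact fun h => hc h.symm
      rw [if_neg (by omega)]
      rw [if_neg (by simp [List.isPrefixOf]; exact fun h => hc h.symm)]
      rw [ih fuel (c :: cur) acc (fun hm => hns (List.mem_cons_of_mem _ hm)) (by simp at hlen ⊢; omega)]
      simp

theorem splitOnMax_no_slash (h : List Char) (hh : '/' ∉ h) :
    PySem.Chars.splitOnMax h ['/'] 1 = [h] := by
  rw [PySem.Chars.splitOnMax, if_neg (by omega)]
  rw [show Int.toNat 1 = 1 from rfl]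
  rw [splitOnMax_go_no_slash h (h.length + 1) [] [] hh (by omega)]
  simp

theorem splitOnMax_first (h t : List Char) (hh : '/' ∉ h) :
    PySem.Chars.splitOnMax (h ++ '/' :: t) ['/'] 1 = [h, t] := by
  rw [PySem.Chars.splitOnMax, if_neg (by omega)]
  rw [show Int.toNat 1 = 1 from rfl]
  rw [splitOnMax_go_first h t _ [] [] hh (by omega)]
  simp

def pSl (c : Char) : Bool := c = '/'
def segsOf (cs : List Char) : List (List Char) := (splitSlash cs).filter (· ≠ [])
def dedA : Bool → List Char → List Char
  | _, [] => []
  | b, c :: cs => if c = '/' then (if b then dedA true cs else '/' :: dedA true cs) else c :: dedA false cs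
def rstripSl (l : List Char) : List Char := (List.dropWhile pSl l.reverse).reverse

theorem foldl_collapse_inv (cs : List Char) : ∀ (acc : List Char),
    cs.foldl (fun acc c => if c = '/' ∧ acc ≠ [] ∧ acc.getLast? = some '/' then acc else acc ++ [c]) acc
      = acc ++ dedA (acc.getLast? == some '/') cs := by
  induction cs with
  | nil => intro acc; simp [dedA]
  | cons c cs ih =>
    intro acc
    simp only [List.foldl_cons]
    by_cases hc : c = '/'
    · by_cases hl : acc.getLast? = some '/'
      · have hne : acc ≠ [] := by intro h; rw [h] at hl; simp at hl
        rw [if_pos ⟨hc, hne, hl⟩, ih acc]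
        simp [dedA, hc, hl]
      · rw [if_neg (by tauto), ih (acc ++ [c])]
        subst hc
        simp [dedA, hl]
    · rw [if_neg (by tauto), ih (acc ++ [c])]
      have : ((acc ++ [c]).getLast? == some '/') = false := by
        simp; exact hc
      rw [this]
      simp [dedA, hc]

theorem foldl_collapse_eq (cs : List Char) :
    cs.foldl (fun acc c => if c = '/' ∧ acc ≠ [] ∧ acc.getLast? = some '/' then acc else acc ++ [c]) []
      = dedA false cs := by
  rw [foldl_collapse_inv cs []]; simp

theorem dedA_true_eq (v : List Char) : dedA true v = dedA false (v.dropWhile pSl) := by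
  induction v with
  | nil => simp [dedA, List.dropWhile]
  | cons c v ih =>
    by_cases hc : c = '/'
    · simp [dedA, hc, List.dropWhile, pSl, ih]
    · simp [dedA, hc, List.dropWhile, pSl]

theorem dedA_no_slash_append (h : List Char) (b : Bool) (t : List Char) (hh : ∀ c ∈ h, c ≠ '/') :
    dedA b (h ++ t) = h ++ dedA (b && h.isEmpty) t := by
  induction h generalizing b with
  | nil => simp
  | cons c h ih =>
    have hc : c ≠ '/' := hh c List.mem_cons_self
    simp only [List.cons_append, dedA, if_neg hc]
    rw [ih false (fun x hx => hh x (List.mem_cons_of_mem _ hx))]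
    simp

theorem stripChars_eq (l : List Char) :
    PySem.Chars.stripChars l ['/'] = rstripSl (l.dropWhile pSl) := by
  have hp : (fun c => List.contains ['/'] c) = pSl := by
    funext c; by_cases h : c = '/' <;> simp [h, pSl]
  simp only [PySem.Chars.stripChars, rstripSl, hp]

theorem rstrip_append_no_slash (h x : List Char) (hh : ∀ c ∈ h, pSl c = false) :
    rstripSl (h ++ x) = h ++ rstripSl x := by
  unfold rstripSl
  rw [List.reverse_append, List.dropWhile_append]
  split
  · next he =>
    have hx : List.dropWhile pSl x.reverse = [] := by simpa using he
    rw [hx]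
    have : List.dropWhile pSl h.reverse = h.reverse := by
      apply List.dropWhile_eq_self_iff.mpr
      intro hl
      have hm : h.reverse[0] ∈ h := by
        have := List.getElem_mem (l := h.reverse) (n := 0) hl
        exact List.mem_reverse.mp this
      rw [hh _ hm]
      simp
    rw [this]; simp
  · simp

theorem rstrip_slash_cons (x : List Char) :
    rstripSl ('/' :: x) = if rstripSl x = [] then [] else '/' :: rstripSl x := by
  unfold rstripSl
  rw [List.reverse_cons, List.dropWhile_append]
  split
  · next he =>
    have : List.dropWhile pSl ['/'] = [] := by simp [List.dropWhile, pSl]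
    rw [this]
    simp only [List.reverse_nil]
    rw [if_pos (by simpa using he)]
  · next he =>
    rw [if_neg (by simpa using he)]
    simp

theorem segsOf_nil : segsOf [] = [] := by simp [segsOf, splitSlash]

theorem segsOf_slash_cons (r : List Char) : segsOf ('/' :: r) = segsOf r := by
  simp [segsOf, splitSlash]

theorem segsOf_dropWhile (r : List Char) : segsOf (r.dropWhile pSl) = segsOf r := by
  induction r with
  | nil => simp
  | cons c r ih =>
    by_cases hc : c = '/'
    · rw [List.dropWhile_cons_of_pos (by simp [pSl, hc])]
      rw [ih, hc, segsOf_slash_cons]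
    · rw [List.dropWhile_cons_of_neg (by simp [pSl, hc])]

theorem splitSlash_append_no_slash (h t : List Char) (hh : ∀ c ∈ h, c ≠ '/') :
    splitSlash (h ++ t) = (splitSlash t).modifyHead (h ++ ·) := by
  induction h with
  | nil =>
    simp only [List.nil_append]
    cases ht : splitSlash t <;> simp [List.modifyHead]
  | cons c h ih =>
    have hc : c ≠ '/' := hh c List.mem_cons_self
    simp only [List.cons_append, splitSlash, if_neg hc]
    rw [ih (fun x hx => hh x (List.mem_cons_of_mem _ hx)), modifyHead_comp]

theorem mem_segsOf (cs : List Char) (l : List Char) (hl : l ∈ segsOf cs) : l ≠ [] ∧ '/' ∉ l := by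
  unfold segsOf at hl
  have h1 := List.mem_filter.mp hl
  exact ⟨by simpa using h1.2, no_slash_mem_splitSlash cs l h1.1⟩

theorem ic_nil : List.intercalate ['/'] ([] : List (List Char)) = [] := by simp [List.intercalate]
theorem ic_singleton (a : List Char) : List.intercalate ['/'] [a] = a := by simp [List.intercalate]
theorem ic_cons (a b : List Char) (L : List (List Char)) :
    List.intercalate ['/'] (a :: b :: L) = a ++ '/' :: List.intercalate ['/'] (b :: L) := by
  simp [List.intercalate, List.intersperse]

theorem ic_segs_ne_nil (cs : List Char) (h : segsOf cs ≠ []) :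
    List.intercalate ['/'] (segsOf cs) ≠ [] := by
  rcases hs : segsOf cs with _ | ⟨a, L⟩
  · exact absurd hs h
  · have ha : a ≠ [] := (mem_segsOf cs a (by rw [hs]; exact List.mem_cons_self)).1
    cases L with
    | nil => rw [ic_singleton]; exact ha
    | cons b L => rw [ic_cons]; simp [ha]

theorem dropWhile_head_false {α : Type} (p : α → Bool) : ∀ (v : List α) (d : α) (t' : List α),
    List.dropWhile p v = d :: t' → p d = false := by
  intro v
  induction v with
  | nil => intro d t' h; simp at h
  | cons c u ih =>
    intro d t' h
    by_cases hc : p c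
    · rw [List.dropWhile_cons_of_pos hc] at h; exact ih d t' h
    · rw [List.dropWhile_cons_of_neg hc] at h
      injection h with h1 h2
      subst h1
      simpa using hc

theorem dropWhile_dedA (v : List Char) :
    List.dropWhile pSl (dedA false (v.dropWhile pSl)) = dedA false (v.dropWhile pSl) := by
  rcases hv : v.dropWhile pSl with _ | ⟨c, u⟩
  · simp [dedA]
  · have hc : pSl c = false := dropWhile_head_false pSl v c u hv
    have hc' : c ≠ '/' := by simpa [pSl] using hc
    simp only [dedA, if_neg hc']
    rw [List.dropWhile_cons_of_neg (by simp [hc])]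

theorem strip_dedA_aux : ∀ (n : Nat) (cs : List Char), cs.length ≤ n →
    PySem.Chars.stripChars (dedA false cs) ['/'] = List.intercalate ['/'] (segsOf cs) := by
  intro n
  induction n with
  | zero =>
    intro cs hlen
    have : cs = [] := List.eq_nil_of_length_eq_zero (Nat.le_zero.mp hlen)
    subst this
    simp [dedA, segsOf_nil, ic_nil, stripChars_eq, rstripSl]
  | succ n ih =>
    intro cs hlen
    rcases cs with _ | ⟨c, r⟩
    · simp [dedA, segsOf_nil, ic_nil, stripChars_eq, rstripSl]
    · by_cases hc : c = '/'
      · -- leading slash: both sides ignore it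
        subst hc
        have hwlen : (r.dropWhile pSl).length ≤ n := by
          have h1 := List.length_dropWhile_le pSl r
          simp at hlen; omega
        have hded : dedA false ('/' :: r) = '/' :: dedA false (r.dropWhile pSl) := by
          simp [dedA, dedA_true_eq]
        rw [hded, stripChars_eq]
        rw [List.dropWhile_cons_of_pos (by simp [pSl])]
        have hdd : List.dropWhile pSl (dedA false (r.dropWhile pSl)) = dedA false (r.dropWhile pSl) := dropWhile_dedA r
        rw [hdd]
        have hstep : rstripSl (dedA false (r.dropWhile pSl)) = List.intercalate ['/'] (segsOf (r.dropWhile pSl)) := by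
          have hq := ih (r.dropWhile pSl) hwlen
          rw [stripChars_eq, dropWhile_dedA r] at hq
          exact hq
        rw [hstep, segsOf_dropWhile, segsOf_slash_cons]
      · -- leading non-slash: peel off the whole first segment
        set h := (c :: r).takeWhile (fun x => !pSl x) with hh
        set t := (c :: r).dropWhile (fun x => !pSl x) with ht
        have hsplit : h ++ t = c :: r := List.takeWhile_append_dropWhile
        have hhns : ∀ x ∈ h, x ≠ '/' := by
          intro x hx
          have := List.mem_takeWhile_imp hx
          simpa [pSl] using this
        have hhne : h ≠ [] := by
          rw [hh, List.takeWhile_cons_of_pos (by simp [pSl, hc])]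
          simp
        have hlen' : h.length + t.length = r.length + 1 := by
          have := congrArg List.length hsplit; simpa using this
        -- LHS: dedA walks through h untouched, strip keeps h
        have hded : dedA false (h ++ t) = h ++ dedA false t := by
          rw [dedA_no_slash_append h false t hhns]; simp
        have hlstrip : List.dropWhile pSl (h ++ dedA false t) = h ++ dedA false t := by
          rcases hcase : h with _ | ⟨a, h'⟩
          · exact absurd hcase hhne
          · simp only [List.cons_append]
            rw [List.dropWhile_cons_of_neg]
            have : a ≠ '/' := hhns a (by rw [hcase]; exact List.mem_cons_self)
            simp [pSl, this]
        have hsegs : splitSlash (h ++ t) = (splitSlash t).modifyHead (h ++ ·) :=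
          splitSlash_append_no_slash h t hhns
        rw [← hsplit, stripChars_eq, hded, hlstrip]
        rw [rstrip_append_no_slash h (dedA false t) (fun x hx => by simp [pSl, hhns x hx])]
        rcases htc : t with _ | ⟨d, t'⟩
        · -- no further slash
          rw [htc] at hsegs
          have : segsOf (h ++ t) = [h] := by
            rw [htc]
            simp only [segsOf, hsegs, splitSlash, List.modifyHead]
            simp [hhne]
          rw [htc] at this
          rw [this, ic_singleton]
          simp [dedA, rstripSl]
        · have hd : d = '/' := by
            have := dropWhile_head_false (fun x => !pSl x) (c :: r) d t' (by rw [← ht, htc])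
            simpa [pSl] using this
          subst hd
          -- t = '/' :: t'
          have hw2 : (t'.dropWhile pSl).length ≤ n := by
            have h1 := List.length_dropWhile_le pSl t'
            have h2 : h.length + t'.length + 1 = r.length + 1 := by
              rw [htc] at hlen'; simp at hlen'; omega
            have h3 : 1 ≤ h.length := by
              rcases hcase : h with _ | _
              · exact absurd hcase hhne
              · simp
            simp at hlen; omega
          have hded2 : dedA false ('/' :: t') = '/' :: dedA false (t'.dropWhile pSl) := by
            simp [dedA, dedA_true_eq]
          rw [hded2, rstrip_slash_cons]
          have hstep : rstripSl (dedA false (t'.dropWhile pSl)) = List.intercalate ['/'] (segsOf (t'.dropWhile pSl)) := by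
            have hq := ih (t'.dropWhile pSl) hw2
            rw [stripChars_eq, dropWhile_dedA t'] at hq
            exact hq
          have hsegw : segsOf (t'.dropWhile pSl) = segsOf t' := segsOf_dropWhile t'
          have hsegcs : segsOf (h ++ '/' :: t') = h :: segsOf t' := by
            simp only [segsOf]
            rw [splitSlash_append_no_slash h _ hhns]
            simp only [splitSlash, List.modifyHead]
            simp [hhne]
          rw [hsegcs]
          by_cases hempty : segsOf t' = []
          · rw [if_pos (by rw [hstep, hsegw, hempty, ic_nil]), hempty, ic_singleton]
            simp
          · rw [if_neg (by rw [hstep, hsegw]; exact ic_segs_ne_nil t' hempty)]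
            rw [hstep, hsegw]
            rcases hs : segsOf t' with _ | ⟨a, L⟩
            · exact absurd hs hempty
            · rw [ic_cons]

theorem segsOf_eq_nil_iff (cs : List Char) : segsOf cs = [] ↔ ∀ c ∈ cs, c = '/' := by
  induction cs with
  | nil => simp [segsOf_nil]
  | cons c r ih =>
    by_cases hc : c = '/'
    · subst hc
      rw [segsOf_slash_cons, ih]
      simp
    · constructor
      · intro h
        exfalso
        have : segsOf (c :: r) ≠ [] := by
          unfold segsOf splitSlash
          rw [if_neg hc]
          rcases hr : splitSlash r with _ | ⟨a, L⟩
          · exact absurd hr (splitSlash_ne_nil r)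
          · simp [List.modifyHead]
        exact this h
      · intro h
        exact absurd (h c List.mem_cons_self) hc

theorem str_ext (a b : String) (h : a.toList = b.toList) : a = b := by
  have := congrArg String.ofList h
  simpa using this

theorem foldl_filter_ne (L : List String) : ∀ (acc : List String),
    L.foldl (fun acc seg => if seg ≠ "" then acc ++ [seg] else acc) acc
      = acc ++ L.filter (fun s => s ≠ "") := by
  induction L with
  | nil => intro acc; simp
  | cons x L ih =>
    intro acc
    by_cases hx : x = ""
    · subst hx
      simp only [List.foldl_cons, List.filter_cons]
      rw [if_neg (fun h : ("" : String) ≠ "" => h rfl), ih acc]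
      simp
    · simp only [List.foldl_cons, if_pos hx, ih (acc ++ [x]), List.filter_cons]
      simp [hx]

theorem ofList_ne_empty (l : List Char) (h : l ≠ []) : String.ofList l ≠ "" := by
  intro he
  have := congrArg String.toList he
  simp at this
  exact h this

theorem filter_map_ofList (S : List (List Char)) :
    (S.map String.ofList).filter (fun s => s ≠ "") = (S.filter (· ≠ [])).map String.ofList := by
  rw [List.filter_map]
  congr 1
  apply List.filter_congr
  intro x _
  by_cases hx : x = []
  · subst hx; simp
  · simp [ofList_ne_empty x hx, hx]

theorem main_eq (url : String) (hpre : ∃ c ∈ url.toList, c ≠ '/') :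
    http_normalize_slashes url = http_normalize_slashes_alt url := by
  obtain ⟨c0, hc0, hcne⟩ := hpre
  have hsegne : segsOf url.toList ≠ [] := by
    rw [Ne, segsOf_eq_nil_iff]
    intro hall; exact hcne (hall c0 hc0)
  rcases hseg : segsOf url.toList with _ | ⟨s0, st⟩
  · exact absurd hseg hsegne
  have hs0 := mem_segsOf url.toList s0 (by rw [hseg]; exact List.mem_cons_self)
  -- A side: the filtered segment list
  have hsplit : (PySem.Str.split? url "/").getD [] = (splitSlash url.toList).map String.ofList := by
    rw [PySem.Str.split?, show ("/" : String).toList = ['/'] from rfl,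
        PySem.Chars.split?, if_neg (by simp)]
    simp [splitOn_eq_splitSlash]
  have hcorrect : ((splitSlash url.toList).map String.ofList).foldl
      (fun acc seg => if seg ≠ "" then acc ++ [seg] else acc) ([] : List String)
      = String.ofList s0 :: st.map String.ofList := by
    rw [foldl_filter_ne _ [], filter_map_ofList]
    show _ ++ (segsOf url.toList).map String.ofList = _
    rw [hseg]
    simp
  -- B side: the collapsed, stripped string
  have hstrip : (PySem.Str.stripChars (String.ofList (url.toList.foldl
      (fun acc c => if c = '/' ∧ acc ≠ [] ∧ acc.getLast? = some '/' then acc else acc ++ [c]) [])) "/").toList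
      = List.intercalate ['/'] (s0 :: st) := by
    rw [foldl_collapse_eq, PySem.Str.toList_stripChars]
    rw [show (String.ofList (dedA false url.toList)).toList = dedA false url.toList by simp]
    rw [show ("/" : String).toList = ['/'] from rfl]
    rw [strip_dedA_aux url.toList.length url.toList (le_refl _), hseg]
  -- the http test is the same on both sides
  have htest : (PySem.Chars.find s0 ['h','t','t','p'] == -1) = !(PySem.Chars.isIn ['h','t','t','p'] s0) := by
    by_cases hin : PySem.Chars.isIn ['h','t','t','p'] s0 = true
    · have hinf := (PySem.Chars.isIn_iff_infix _ _).mp hin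
      have hf : PySem.Chars.find s0 ['h','t','t','p'] ≠ -1 := by
        rw [Ne, PySem.Chars.find_eq_neg_one_iff]
        simpa using hinf
      simp [hin, hf]
    · have hf : PySem.Chars.find s0 ['h','t','t','p'] = -1 :=
        (PySem.Chars.find_eq_neg_one_iff _ _).mpr (fun h => hin ((PySem.Chars.isIn_iff_infix _ _).mpr h))
      simp [hf, Bool.eq_false_iff.mpr hin]
  -- B side: the split into head and rest
  have hparts : (PySem.Str.splitMax? (PySem.Str.stripChars (String.ofList (url.toList.foldl
      (fun acc c => if c = '/' ∧ acc ≠ [] ∧ acc.getLast? = some '/' then acc else acc ++ [c]) [])) "/") "/" 1).getD []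
      = (PySem.Chars.splitOnMax (List.intercalate ['/'] (s0 :: st)) ['/'] 1).map String.ofList := by
    rw [PySem.Str.splitMax?, show ("/" : String).toList = ['/'] from rfl, hstrip,
        PySem.Chars.splitMax?, if_neg (by simp)]
    rfl
  have hcat : ∀ a b : String, (strCat a b).toList = a.toList ++ b.toList := by
    intro a b; simp [strCat]
  -- assemble
  apply str_ext
  show (http_normalize_slashes url).toList = (http_normalize_slashes_alt url).toList
  rw [http_normalize_slashes, http_normalize_slashes_alt]
  simp only [hsplit, hcorrect, hparts]
  rcases st with _ | ⟨b, L⟩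
  · -- single segment
    rw [show List.intercalate ['/'] [s0] = s0 from ic_singleton s0]
    rw [splitOnMax_no_slash s0 hs0.2]
    simp only [List.map_cons, List.map_nil, List.headD_cons]
    rw [show PySem.Str.find (String.ofList s0) "http" = PySem.Chars.find s0 ['h','t','t','p'] by
          simp [PySem.Str.find],
        show PySem.Str.isIn "http" (String.ofList s0) = PySem.Chars.isIn ['h','t','t','p'] s0 by
          simp [PySem.Str.isIn],
        htest]
    by_cases hin : PySem.Chars.isIn ['h','t','t','p'] s0 = true
    · rw [hin]
      simp only [Bool.not_true, Bool.false_eq_true, if_false, if_true]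
      rw [PySem.Str.toList_replace, PySem.Str.toList_replace, PySem.Str.toList_join]
      simp [PySem.Chars.join, hcat, List.intercalate]
    · rw [Bool.eq_false_iff.mpr hin]
      simp only [Bool.not_false, if_true, Bool.false_eq_true, if_false]
      rw [PySem.Str.toList_replace, PySem.Str.toList_replace, PySem.Str.toList_join]
      simp [PySem.Chars.join, hcat, List.intercalate]
  · -- at least two segments
    have hmapid : List.map (String.toList ∘ String.ofList) L = L := by
      simp [Function.comp_def]
    rw [ic_cons]
    rw [splitOnMax_first s0 _ hs0.2]
    simp only [List.map_cons, List.map_nil, List.headD_cons]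
    rw [show PySem.Str.find (String.ofList s0) "http" = PySem.Chars.find s0 ['h','t','t','p'] by
          simp [PySem.Str.find],
        show PySem.Str.isIn "http" (String.ofList s0) = PySem.Chars.isIn ['h','t','t','p'] s0 by
          simp [PySem.Str.isIn],
        htest]
    by_cases hin : PySem.Chars.isIn ['h','t','t','p'] s0 = true
    · rw [hin]
      simp only [Bool.not_true, Bool.false_eq_true, if_false, if_true]
      rw [PySem.Str.toList_replace, PySem.Str.toList_replace, PySem.Str.toList_join]
      simp [PySem.Chars.join, hcat, List.intercalate, hmapid]
    · rw [Bool.eq_false_iff.mpr hin]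
      simp only [Bool.not_false, if_true, Bool.false_eq_true, if_false]
      rw [PySem.Str.toList_replace, PySem.Str.toList_replace, PySem.Str.toList_join]
      simp [PySem.Chars.join, hcat, List.intercalate, List.intersperse, hmapid]

-- ===== VERDICT (by name: the statement is the Claim_ definition above) =====
theorem http_normalize_slashes_spec : Claim_equal_http_normalize_slashes := by
  intro url _ hpre
  unfold Spec_http_normalize_slashes
  unfold Pre_http_normalize_slashes at hpre
  exact main_eq url (by simpa using hpre)
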